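-- pv_equiv track=rewrite | github.com/dimipash/Python_tasks | close_values.py | close_values
-- ===== SOURCE A (Python) =====
-- def close_values(nums1, nums2):
--     """
--     This function checks if every number in the longer list (nums2 if not equal length) is either equal to,
--     one less than, or one more than a number in the shorter list (nums1 if not equal length).
--
--     Parameters:
--     nums1 (list): The first list of numbers.
--     nums2 (list): The second list of numbers.
--
--     Returns:
--     bool: True if every number in the longer list is either equal to, one less than, or one more than a number in the shorter list. False otherwise.
--     """
--
--     if len(nums1) > len(nums2):
--         nums1, nums2 = nums2, nums1
--
--     s1 = set(nums1)
--     for n2 in nums2: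
--         if n2 - 1 in s1 or n2 in s1 or n2 + 1 in s1:
--             continue
--         else:
--             return False
--     return True
-- ===== SOURCE B (Python) =====
-- def close_values(nums1, nums2):
--     if len(nums1) > len(nums2):
--         nums1, nums2 = nums2, nums1
--     short = sorted(nums1)
--     i = 0
--     for n in sorted(nums2):
--         while i < len(short) and short[i] < n - 1:
--             i += 1
--         if i == len(short) or short[i] > n + 1:
--             return False
--     return True
-- ===== Notes on version B (the rewrite author's own statement) =====
-- stated objective: alternative
-- what changed: B replaces A's hash-set membership probes by a sort-then-merge two-pointer scan: both lists are sorted and a single monotone index into the short list is advanced past elements smaller than n-1, so each long-list element is checked against at most one short-list element with no set at all.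
import Mathlib
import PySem

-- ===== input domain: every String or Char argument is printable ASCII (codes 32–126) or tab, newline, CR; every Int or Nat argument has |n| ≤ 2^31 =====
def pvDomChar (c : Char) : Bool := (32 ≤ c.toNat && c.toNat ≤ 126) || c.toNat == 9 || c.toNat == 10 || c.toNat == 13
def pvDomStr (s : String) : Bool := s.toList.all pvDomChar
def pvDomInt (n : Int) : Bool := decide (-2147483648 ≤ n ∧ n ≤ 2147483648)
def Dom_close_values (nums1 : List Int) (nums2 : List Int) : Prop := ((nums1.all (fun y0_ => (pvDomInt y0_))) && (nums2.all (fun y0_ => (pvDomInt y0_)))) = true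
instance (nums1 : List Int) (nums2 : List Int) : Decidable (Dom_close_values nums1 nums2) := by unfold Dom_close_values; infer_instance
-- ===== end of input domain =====

-- B replaces A's hash-set probes by a sort-then-merge two-pointer scan (no set at all); objective: alternative.

-- ===== PORT A =====
-- the 'for n2 in nums2: … continue/return False' loop
def closeLoopA (s1 : PySem.Set Int) : List Int → Bool
  | [] => true
  | n2 :: rest =>
      if s1.contains (n2 - 1) || s1.contains n2 || s1.contains (n2 + 1) then
        closeLoopA s1 rest
      else
        false

def close_values (nums1 : List Int) (nums2 : List Int) : Bool :=
  let p := if nums1.length > nums2.length then (nums2, nums1) else (nums1, nums2)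
  let s1 := PySem.Set.ofList p.1
  closeLoopA s1 p.2

-- ===== PORT B =====
-- the inner 'while i < len(short) and short[i] < n - 1: i += 1'
-- (short[i] is ported as getD; exact: the short-circuit guard only reads it when i < len(short))
def advanceB (short : List Int) (n : Int) (i : Nat) : Nat :=
  if i < short.length ∧ short.getD i 0 < n - 1 then advanceB short n (i + 1) else i
termination_by short.length - i
decreasing_by omega

-- the 'for n in sorted(nums2): …' loop carrying the monotone index i
def loopB (short : List Int) : Nat → List Int → Bool
  | _, [] => true
  | i, n :: rest =>
      let i' := advanceB short n i
      if i' = short.length ∨ short.getD i' 0 > n + 1 then false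
      else loopB short i' rest

def close_values_alt (nums1 : List Int) (nums2 : List Int) : Bool :=
  let p := if nums1.length > nums2.length then (nums2, nums1) else (nums1, nums2)
  let short := PySem.List.sorted p.1 (fun x => x) false
  loopB short 0 (PySem.List.sorted p.2 (fun x => x) false)

-- ===== PRECONDITION & SPEC =====
def Spec_close_values (nums1 : List Int) (nums2 : List Int) (out : Bool) : Prop := out = close_values_alt nums1 nums2
instance (nums1 : List Int) (nums2 : List Int) (out : Bool) : Decidable (Spec_close_values nums1 nums2 out) := by unfold Spec_close_values; infer_instance

-- ===== CLAIM =====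
def Claim_equal_close_values : Prop := ∀ (nums1 : List Int) (nums2 : List Int), Dom_close_values nums1 nums2 → Spec_close_values nums1 nums2 (close_values nums1 nums2)

-- ===== LEMMAS AND PROOFS =====

-- "n is close to some element of l"
def CloseOk (l : List Int) (n : Int) : Prop := ∃ x ∈ l, n - 1 ≤ x ∧ x ≤ n + 1

theorem closeLoopA_iff (l m : List Int) :
    closeLoopA (PySem.Set.ofList l) m = true ↔ ∀ n ∈ m, CloseOk l n := by
  induction m with
  | nil => simp [closeLoopA]
  | cons n rest ih =>
      simp only [closeLoopA, List.mem_cons]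
      by_cases h : ((PySem.Set.ofList l).contains (n - 1) || (PySem.Set.ofList l).contains n
          || (PySem.Set.ofList l).contains (n + 1)) = true
      · have hok : CloseOk l n := by
          simp only [Bool.or_eq_true, PySem.Set.contains_iff, PySem.Set.mem_ofList] at h
          rcases h with (h | h) | h
          · exact ⟨n - 1, h, by omega⟩
          · exact ⟨n, h, by omega⟩
          · exact ⟨n + 1, h, by omega⟩
        rw [if_pos h, ih]
        constructor
        · intro hr k hk; rcases hk with rfl | hk
          · exact hok
          · exact hr k hk
        · intro hall k hk; exact hall k (Or.inr hk)
      · rw [if_neg h]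
        simp only [Bool.or_eq_true, PySem.Set.contains_iff, PySem.Set.mem_ofList, not_or] at h
        constructor
        · intro hfalse; cases hfalse
        · intro hall
          rcases hall n (Or.inl rfl) with ⟨x, hx, h1, h2⟩
          exfalso
          have : x = n - 1 ∨ x = n ∨ x = n + 1 := by omega
          rcases this with rfl | rfl | rfl
          · exact absurd hx h.1.1
          · exact absurd hx h.1.2
          · exact absurd hx h.2

theorem advanceB_le (short : List Int) (n : Int) (i : Nat) : i ≤ advanceB short n i := by
  unfold advanceB
  split
  · have := advanceB_le short n (i + 1); omega
  · omega
termination_by short.length - i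
decreasing_by omega

theorem advanceB_bound (short : List Int) (n : Int) (i : Nat) (h : i ≤ short.length) :
    advanceB short n i ≤ short.length := by
  unfold advanceB
  split
  · exact advanceB_bound short n (i + 1) (by omega)
  · exact h
termination_by short.length - i
decreasing_by omega

theorem advanceB_stop (short : List Int) (n : Int) (i : Nat) :
    ¬ (advanceB short n i < short.length ∧ short.getD (advanceB short n i) 0 < n - 1) := by
  unfold advanceB
  split
  · exact advanceB_stop short n (i + 1)
  · assumption
termination_by short.length - i
decreasing_by omega

theorem advanceB_skipped (short : List Int) (n : Int) (i j : Nat)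
    (h1 : i ≤ j) (h2 : j < advanceB short n i) : short.getD j 0 < n - 1 := by
  by_cases hc : i < short.length ∧ short.getD i 0 < n - 1
  · rw [advanceB, if_pos hc] at h2
    rcases Nat.eq_or_lt_of_le h1 with rfl | hlt
    · exact hc.2
    · exact advanceB_skipped short n (i + 1) j hlt h2
  · rw [advanceB, if_neg hc] at h2; omega
termination_by short.length - i
decreasing_by omega

-- monotone access in a sorted list (via getD)
theorem getD_mono (short : List Int) (hs : short.Pairwise (· ≤ ·)) (p q : Nat)
    (hpq : p ≤ q) (hq : q < short.length) : short.getD p 0 ≤ short.getD q 0 := by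
  rcases Nat.eq_or_lt_of_le hpq with rfl | hlt
  · exact le_refl _
  · rw [List.getD_eq_getElem short 0 (by omega), List.getD_eq_getElem short 0 hq]
    exact (List.pairwise_iff_getElem.mp hs) p q (by omega) hq hlt

theorem loopB_iff (short : List Int) (hs : short.Pairwise (· ≤ ·)) :
    ∀ (m : List Int) (i : Nat), i ≤ short.length →
    m.Pairwise (· ≤ ·) →
    (∀ j, j < i → ∀ n ∈ m, short.getD j 0 < n - 1) →
    (loopB short i m = true ↔ ∀ n ∈ m, CloseOk short n) := by
  intro m
  induction m with
  | nil => intro i _ _ _; simp [loopB]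
  | cons n rest ih =>
      intro i hi hpw hinv
      have hadv_le := advanceB_le short n i
      have hadv_bd := advanceB_bound short n i hi
      set i' := advanceB short n i with hi'
      have hallj : ∀ j, j < i' → short.getD j 0 < n - 1 := by
        intro j hj
        by_cases hji : j < i
        · exact hinv j hji n (List.mem_cons_self ..)
        · exact advanceB_skipped short n i j (by omega) hj
      have hmem : ∀ k ∈ rest, n ≤ k := by
        intro k hk; exact (List.pairwise_cons.mp hpw).1 k hk
      simp only [loopB, ← hi']
      by_cases hstop : i' = short.length ∨ short.getD i' 0 > n + 1
      · rw [if_pos hstop]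
        constructor
        · intro hfalse; cases hfalse
        · intro hall
          exfalso
          rcases hall n (List.mem_cons_self ..) with ⟨x, hx, h1, h2⟩
          rcases List.getElem_of_mem hx with ⟨j, hjlen, hjx⟩
          have hxj : short.getD j 0 = x := by
            rw [List.getD_eq_getElem short 0 hjlen]; exact hjx
          by_cases hji' : j < i'
          · have := hallj j hji'; omega
          · have hil : i' < short.length := by omega
            have hgt : short.getD i' 0 > n + 1 := by
              rcases hstop with h | h
              · omega
              · exact h
            have := getD_mono short hs i' j (by omega) hjlen
            omega
      · rw [if_neg hstop]
        rw [not_or] at hstop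
        have hil : i' < short.length := by
          rcases Nat.lt_or_ge i' short.length with h | h
          · exact h
          · exact absurd (by omega : i' = short.length) hstop.1
        have hlo : n - 1 ≤ short.getD i' 0 := by
          have := advanceB_stop short n i
          rw [← hi'] at this
          rw [not_and] at this
          have := this hil
          rw [not_lt] at this
          omega
        have hhi : short.getD i' 0 ≤ n + 1 := by omega
        have hokn : CloseOk short n := by
          refine ⟨short.getD i' 0, ?_, hlo, hhi⟩
          rw [List.getD_eq_getElem short 0 hil]
          exact List.getElem_mem hil
        have hinv' : ∀ j, j < i' → ∀ k ∈ rest, short.getD j 0 < k - 1 := by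
          intro j hj k hk
          have := hallj j hj
          have := hmem k hk
          omega
        rw [ih i' (by omega) (List.pairwise_cons.mp hpw).2 hinv']
        constructor
        · intro hr k hk
          rcases List.mem_cons.mp hk with rfl | hk
          · exact hokn
          · exact hr k hk
        · intro hall k hk; exact hall k (List.mem_cons_of_mem _ hk)

theorem sorted_pairwise_le (l : List Int) :
    (PySem.List.sorted l (fun x => x) false).Pairwise (· ≤ ·) := by
  have := PySem.List.sorted_pairwise (xs := l) (key := fun x => x)
  simpa using this

theorem closeOk_sorted (l : List Int) (n : Int) :
    CloseOk (PySem.List.sorted l (fun x => x) false) n ↔ CloseOk l n := by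
  unfold CloseOk
  constructor
  · rintro ⟨x, hx, h⟩
    exact ⟨x, (PySem.List.mem_sorted _ _ _ _).mp hx, h⟩
  · rintro ⟨x, hx, h⟩
    exact ⟨x, (PySem.List.mem_sorted _ _ _ _).mpr hx, h⟩

theorem both_iff (l1 l2 : List Int) :
    closeLoopA (PySem.Set.ofList l1) l2
      = loopB (PySem.List.sorted l1 (fun x => x) false) 0 (PySem.List.sorted l2 (fun x => x) false) := by
  rw [Bool.eq_iff_iff, closeLoopA_iff]
  rw [loopB_iff (PySem.List.sorted l1 (fun x => x) false) (sorted_pairwise_le l1)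
      (PySem.List.sorted l2 (fun x => x) false) 0 (Nat.zero_le _)
      (sorted_pairwise_le l2) (by intro j hj; omega)]
  constructor
  · intro h n hn
    exact (closeOk_sorted l1 n).mpr (h n ((PySem.List.mem_sorted _ _ _ _).mp hn))
  · intro h n hn
    exact (closeOk_sorted l1 n).mp (h n ((PySem.List.mem_sorted _ _ _ _).mpr hn))

-- ===== VERDICT =====
theorem close_values_spec : Claim_equal_close_values := by
  intro nums1 nums2 _
  unfold Spec_close_values close_values close_values_alt
  split <;> exact both_iff _ _
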